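-- pv_equiv track=rewrite | github.com/acorrenson/miniDna | src/miniDna.py | simpleAlign
-- ===== SOURCE A (Python) =====
-- def countIdentical(seqA: str, seqB: str) -> int:
--   """Return the number of equal nucleotides between two sequences.
--
--     **Keyword arguments:**
--     seqA -- the first sequence
--     seqB -- the second sequence
--   """
--
--   if len(seqA) != len(seqB):
--     raise ValueError("sequences have unequal length")
--   count = sum(ch1 == ch2 for ch1, ch2 in zip(seqA, seqB))
--   return count
--
-- def simpleAlign(seqA: str, seqB: str) -> tuple:
--   """Find the best way to superimpose two sequences
--     without changing them.
--     Empty nucleotides used to match as best as possible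
--     the sequences are symbolized with a "-" character.
--
--     **Keyword arguments:**
--     seqA -- the first sequence
--     seqB -- the second sequence
--   """
--
--   bestShift = 0
--   shift = 0
--   countId = countIdentical(seqA, seqB)
--
--   while(shift < len(seqA)):
--     shift += 1
--     a = seqA[shift:len(seqA)]
--     b = seqB[0:len(seqB) - shift]
--     c = countIdentical(a, b)
--     if c > countId:
--       countId = c
--       bestShift = shift
--
--
--   finalA = seqA + "".join("-" for j in range(bestShift))
--   finalB = "".join("-" for i in range(bestShift)) + seqB
--
--   return (finalA, finalB)
-- ===== SOURCE B (Python) =====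
-- def simpleAlign(seqA: str, seqB: str) -> tuple:
--   """Dot-plot re-implementation: index seqB's positions by character, accumulate
--   match counts per diagonal (shift), then pick the smallest shift with the
--   maximal count. Only pairs of equal characters are ever visited."""
--   if len(seqA) != len(seqB):
--     raise ValueError("sequences have unequal length")
--   n = len(seqA)
--   pos = {}
--   for j, ch in enumerate(seqB):
--     pos.setdefault(ch, []).append(j)
--   counts = [0] * (n + 1)
--   for i, ch in enumerate(seqA):
--     for j in pos.get(ch, []):
--       if j <= i:
--         counts[i - j] += 1
--   best = counts.index(max(counts))
--   pad = "-" * best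
--   return (seqA + pad, pad + seqB)
-- ===== Notes on version B (the rewrite author's own statement) =====
-- stated objective: alternative
-- what changed: B replaces A's per-shift slicing and recounting (a fresh pair of slices and a full zip-count for every shift) by a dot-plot scheme: it indexes seqB's positions by character once, accumulates match counts per diagonal i-j in one pass that visits only pairs of equal characters, then picks counts.index(max(counts)).
import Mathlib
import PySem

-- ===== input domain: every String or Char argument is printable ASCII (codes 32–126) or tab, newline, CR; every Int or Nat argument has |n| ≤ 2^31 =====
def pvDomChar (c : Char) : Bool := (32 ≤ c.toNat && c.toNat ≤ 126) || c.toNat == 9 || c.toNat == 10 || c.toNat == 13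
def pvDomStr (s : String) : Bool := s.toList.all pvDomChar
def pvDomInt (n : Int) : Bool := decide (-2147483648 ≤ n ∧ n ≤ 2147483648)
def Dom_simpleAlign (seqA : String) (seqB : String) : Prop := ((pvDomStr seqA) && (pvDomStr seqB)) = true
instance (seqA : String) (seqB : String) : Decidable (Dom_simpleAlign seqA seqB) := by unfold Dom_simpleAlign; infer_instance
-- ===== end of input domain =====

-- B replaces A's per-shift slice-and-recount scan by a character-position index of seqB
-- and a single diagonal (dot-plot) accumulation of the match counts; an alternative algorithm.


-- ===== PORT A =====
-- countIdentical: none = Python's ValueError on unequal lengths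
def pvCountIdentical? (a b : List Char) : Option Int :=
  if a.length ≠ b.length then none
  else some (((a.zip b).map (fun p => if p.1 = p.2 then (1 : Int) else 0)).sum)

def simpleAlign (seqA : String) (seqB : String) : List String :=
  let la := seqA.toList
  let lb := seqB.toList
  match pvCountIdentical? la lb with
  | none => []   -- Python raises ValueError here (excluded by Pre_simpleAlign)
  | some c0 =>
    -- while shift < len(seqA): shift += 1; … — i.e. the body runs for shift = 1 … len(seqA)
    let st := (PySem.List.pyRange 1 ((la.length : Int) + 1)).foldl
      (fun (st : Int × Int) (shift : Int) =>
        match pvCountIdentical? (PySem.List.slice la (some shift) (some (la.length : Int)))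
                                (PySem.List.slice lb (some 0) (some ((lb.length : Int) - shift))) with
        | some c => if c > st.2 then (shift, c) else st
        | none => st)   -- unreachable: both slices have length len(seqA) - shift
      ((0 : Int), c0)
    let dashes := (PySem.List.pyRange 0 st.1).map (fun _ => '-')
    [String.ofList (la ++ dashes), String.ofList (dashes ++ lb)]

-- ===== PORT B =====
def simpleAlign_alt (seqA : String) (seqB : String) : List String :=
  let la := seqA.toList
  let lb := seqB.toList
  if la.length ≠ lb.length then []   -- Python raises ValueError here (excluded by Pre_simpleAlign)
  else
  let n := la.length
  -- pos: character -> list of its positions in seqB (setdefault/append)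
  let pos := (PySem.List.enumerate lb).foldl
    (fun (pos : PySem.Dict Char (List Int)) jc =>
      pos.insert jc.2 ((pos.getD jc.2 []) ++ [jc.1])) PySem.Dict.empty
  -- counts[s] accumulates the matches on diagonal s = i - j
  let counts := (PySem.List.enumerate la).foldl
    (fun (counts : List Int) ic =>
      (pos.getD ic.2 []).foldl
        (fun (counts : List Int) j =>
          if j ≤ ic.1 then
            counts.set (ic.1 - j).toNat (counts.getD (ic.1 - j).toNat 0 + 1)   -- i - j is in range (0 ≤ i-j ≤ n)
          else counts)
        counts)
    (List.replicate (n + 1) 0)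
  let m := (PySem.List.max? counts (fun x => x)).getD 0   -- counts ≠ [], so max? is some
  let best := (PySem.List.index? counts m).getD 0          -- m ∈ counts, so index? is some
  let pad := List.replicate best '-'                       -- "-" * best
  [String.ofList (la ++ pad), String.ofList (pad ++ lb)]

-- ===== PRECONDITION & SPEC =====
-- A raises ValueError ("sequences have unequal length") whenever the two strings differ in length;
-- Pre_ excludes exactly those inputs.
def Pre_simpleAlign (seqA : String) (seqB : String) : Prop :=
  seqA.toList.length = seqB.toList.length
instance (seqA : String) (seqB : String) : Decidable (Pre_simpleAlign seqA seqB) := by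
  unfold Pre_simpleAlign; infer_instance

def pvWitness_simpleAlign : String × String := ("GATTACA", "GACTATA")

def Spec_simpleAlign (seqA : String) (seqB : String) (out : List String) : Prop := out = simpleAlign_alt seqA seqB
instance (seqA : String) (seqB : String) (out : List String) : Decidable (Spec_simpleAlign seqA seqB out) := by unfold Spec_simpleAlign; infer_instance

-- ===== CLAIM (what is proved, stated in full; the proofs are below) =====
def Claim_equal_simpleAlign : Prop := ∀ (seqA : String) (seqB : String), Dom_simpleAlign seqA seqB → Pre_simpleAlign seqA seqB → Spec_simpleAlign seqA seqB (simpleAlign seqA seqB)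

-- ===== LEMMAS AND PROOFS =====

-- the count A computes at shift s (number of equal characters after shifting by s)
def pvG (la lb : List Char) (s : Nat) : Nat :=
  ((la.drop s).zip lb).countP (fun p => p.1 == p.2)

-- abstract form of A's running-argmax loop
def pvRun (bi m k : Int) : List Int → Int × Int
  | [] => (bi, m)
  | x :: t => if x > m then pvRun k x (k + 1) t else pvRun bi m (k + 1) t

lemma pvFoldl_max_mem (t : List Int) (m : Int) :
    t.foldl max m = m ∨ t.foldl max m ∈ t := by
  induction t generalizing m with
  | nil => exact Or.inl rfl
  | cons x t ih =>
    simp only [List.foldl_cons]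
    rcases ih (max m x) with h | h
    · rcases max_choice m x with hm | hm
      · exact Or.inl (by rw [h, hm])
      · exact Or.inr (by rw [h, hm]; exact List.mem_cons_self)
    · exact Or.inr (List.mem_cons_of_mem _ h)

lemma pvRun_spec (t : List Int) (k bi m : Int) :
    pvRun bi m k t =
      if t.foldl max m = m then (bi, m)
      else (k + ((List.idxOf? (t.foldl max m) t).getD 0 : Nat), t.foldl max m) := by
  induction t generalizing k bi m with
  | nil => simp [pvRun]
  | cons x t ih =>
    simp only [pvRun, List.foldl_cons]
    have hxle := (PySem.List.le_foldl_max t x).1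
    have hmle := (PySem.List.le_foldl_max t m).1
    by_cases hxm : x > m
    · rw [if_pos hxm, ih, show max m x = x by omega]
      by_cases hM : t.foldl max x = x
      · rw [if_pos hM, hM, if_neg (by omega)]
        simp [List.idxOf?_cons]
      · rw [if_neg hM, if_neg (by omega)]
        have hmem : t.foldl max x ∈ t := (pvFoldl_max_mem t x).resolve_left hM
        rw [List.idxOf?_cons, if_neg (by simp only [beq_iff_eq]; intro h; exact hM h.symm)]
        obtain ⟨i0, hi0⟩ : ∃ i0, List.idxOf? (t.foldl max x) t = some i0 := by
          cases h : List.idxOf? (t.foldl max x) t with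
          | none => exact absurd (List.idxOf?_eq_none_iff.mp h) (by simp [hmem])
          | some i0 => exact ⟨i0, rfl⟩
        rw [hi0]
        simp only [Option.map_some, Option.getD_some, Prod.mk.injEq]
        exact ⟨by push_cast; ring, trivial⟩
    · rw [if_neg hxm, ih, show max m x = m by omega]
      by_cases hM : t.foldl max m = m
      · rw [if_pos hM, if_pos hM]
      · rw [if_neg hM, if_neg hM]
        have hmem : t.foldl max m ∈ t := (pvFoldl_max_mem t m).resolve_left hM
        rw [List.idxOf?_cons, if_neg (by simp only [beq_iff_eq]; intro h; omega)]
        obtain ⟨i0, hi0⟩ : ∃ i0, List.idxOf? (t.foldl max m) t = some i0 := by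
          cases h : List.idxOf? (t.foldl max m) t with
          | none => exact absurd (List.idxOf?_eq_none_iff.mp h) (by simp [hmem])
          | some i0 => exact ⟨i0, rfl⟩
        rw [hi0]
        simp only [Option.map_some, Option.getD_some, Prod.mk.injEq]
        exact ⟨by push_cast; ring, trivial⟩

-- a[s:n] and b[:n-s] as A slices them, with equal lengths
lemma pvZip_take_right {α : Type} (xs ys : List α) (k : Nat) (h : xs.length ≤ k) :
    xs.zip (ys.take k) = xs.zip ys := by
  induction xs generalizing ys k with
  | nil => simp
  | cons x xs ih =>
    cases ys with
    | nil => simp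
    | cons y ys =>
      cases k with
      | zero => simp at h
      | succ k => simp only [List.take_succ_cons, List.zip_cons_cons]
                  rw [ih ys k (by simpa using h)]

lemma pvCountIdentical?_slices (la lb : List Char) (h : la.length = lb.length)
    (s : Nat) (hs : s ≤ la.length) :
    pvCountIdentical? (PySem.List.slice la (some (s : Int)) (some (la.length : Int)))
                      (PySem.List.slice lb (some 0) (some ((lb.length : Int) - (s : Int))))

      = some ((pvG la lb s : Nat) : Int) := by
  have h1 : PySem.List.slice la (some (s : Int)) (some (la.length : Int)) = la.drop s := by
    rw [PySem.List.slice_natCast la s la.length]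
    exact List.take_of_length_le (by simp)
  have h2 : PySem.List.slice lb (some 0) (some ((lb.length : Int) - (s : Int)))
      = lb.take (lb.length - s) := by
    rw [show ((lb.length : Int) - (s : Int)) = ((lb.length - s : Nat) : Int) by omega,
        show (0 : Int) = ((0 : Nat) : Int) from rfl, PySem.List.slice_natCast]
    simp
  rw [h1, h2]
  unfold pvCountIdentical?
  rw [if_neg (by simp; omega)]
  rw [pvZip_take_right _ _ _ (by simp; omega)]
  rw [show (fun (p : Char × Char) => if p.1 = p.2 then (1 : Int) else 0)
        = (fun p => if ((fun (q : Char × Char) => q.1 == q.2) p) = true then 1 else 0) by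
      funext p; simp]
  rw [PySem.List.sum_map_ite_one_zero]
  rfl

-- one iteration of A's loop at shift s, as an if on the running state
lemma pvA_step (la lb : List Char) (h : la.length = lb.length)
    (s : Nat) (hs : s ≤ la.length) (st : Int × Int) :
    (match pvCountIdentical? (PySem.List.slice la (some ((s : Nat) : Int)) (some (la.length : Int)))
                             (PySem.List.slice lb (some 0) (some ((lb.length : Int) - ((s : Nat) : Int)))) with
     | some c => if c > st.2 then (((s : Nat) : Int), c) else st
     | none => st)
    = if ((pvG la lb s : Nat) : Int) > st.2 then (((s : Nat) : Int), ((pvG la lb s : Nat) : Int)) else st := by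
  rw [pvCountIdentical?_slices la lb h s hs]

-- A's foldl over pyRange s (n+1) is pvRun over the counts for shifts s … n
lemma pvA_fold (la lb : List Char) (h : la.length = lb.length)
    (d s : Nat) (hd : s + d = la.length + 1) (st : Int × Int) :
    (PySem.List.pyRange (s : Int) ((la.length : Int) + 1)).foldl
      (fun (st : Int × Int) (shift : Int) =>
        match pvCountIdentical? (PySem.List.slice la (some shift) (some (la.length : Int)))
                                (PySem.List.slice lb (some 0) (some ((lb.length : Int) - shift))) with
        | some c => if c > st.2 then (shift, c) else st
        | none => st) st
    = pvRun st.1 st.2 (s : Int) ((List.range' s d).map (fun i => (pvG la lb i : Int))) := by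
  induction d generalizing s st with
  | zero =>
    rw [show PySem.List.pyRange (s : Int) ((la.length : Int) + 1) = [] by
          simp [PySem.List.pyRange]; omega]
    rfl
  | succ d ih =>
    have hlt : (s : Int) < (la.length : Int) + 1 := by omega
    rw [PySem.List.pyRange_one_cons hlt, List.foldl_cons, List.range'_succ, List.map_cons]
    rw [pvA_step la lb h s (by omega)]
    simp only [pvRun]
    have hcast : ((s + 1 : Nat) : Int) = (s : Int) + 1 := by omega
    by_cases hc : ((pvG la lb s : Nat) : Int) > st.2
    · rw [if_pos hc, if_pos hc]
      have h2 := ih (s + 1) (by omega) ((s : Int), ((pvG la lb s : Nat) : Int))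
      rw [hcast] at h2
      exact h2
    · rw [if_neg hc, if_neg hc]
      have h2 := ih (s + 1) (by omega) st
      rw [hcast] at h2
      exact h2

-- ---- B side ----

-- the dict pos maps ch to the list of positions of ch in lb
lemma pvPos_getD (l : List (Int × Char)) (d : PySem.Dict Char (List Int)) (ch : Char) :
    (l.foldl (fun d jc => d.insert jc.2 ((d.getD jc.2 []) ++ [jc.1])) d).getD ch []
      = d.getD ch [] ++ l.filterMap (fun jc => if jc.2 = ch then some jc.1 else none) := by
  induction l generalizing d with
  | nil => simp
  | cons jc l ih =>
    simp only [List.foldl_cons, ih, List.filterMap_cons]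
    rw [PySem.Dict.getD_insert]
    by_cases h : jc.2 = ch
    · rw [if_pos h.symm, if_pos h]
      rw [h]
      simp
    · rw [if_neg (fun hh => h hh.symm), if_neg h]

lemma pvEnumerate_eq (l : List Char) (k : Int) :
    PySem.List.enumerate l k = (l.zipIdx).map (fun p => (k + (p.2 : Int), p.1)) := by
  induction l generalizing k with
  | nil => rfl
  | cons x l ih =>
    rw [show PySem.List.enumerate (x :: l) k = (k, x) :: PySem.List.enumerate l (k + 1) by
          simp [PySem.List.enumerate]]
    rw [ih, List.zipIdx_cons, List.map_cons, List.zipIdx_succ, List.map_map]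
    refine congrArg₂ _ (by simp) ?_
    apply List.map_congr_left
    rintro ⟨pc, pi⟩ _
    simp only [Function.comp]
    exact Prod.ext (by omega) rfl

-- fold of guarded updates = fold of updates over the filtered list
lemma pvFoldl_filter {α β : Type} (f : β → α → β) (p : α → Prop) [DecidablePred p] (l : List α) (b : β) :
    l.foldl (fun b a => if p a then f b a else b) b = (l.filter (fun a => decide (p a))).foldl f b := by
  induction l generalizing b with
  | nil => rfl
  | cons x l ih =>
    simp only [List.foldl_cons, List.filter_cons]
    by_cases hx : p x
    · simp [hx, ih]
    · simp [hx, ih]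

lemma pvIncr_getElem? (E : List Nat) (cs : List Int) (s : Nat)
    (hE : ∀ d ∈ E, d < cs.length) :
    (E.foldl (fun cs d => cs.set d (cs.getD d 0 + 1)) cs)[s]?
      = cs[s]?.map (· + (E.count s : Int)) := by
  induction E generalizing cs with
  | nil => simp
  | cons d E ih =>
    have hd : d < cs.length := hE d List.mem_cons_self
    simp only [List.foldl_cons]
    rw [ih _ (fun e he => by rw [List.length_set]; exact hE e (List.mem_cons_of_mem _ he))]
    obtain ⟨v, hv⟩ : ∃ v, cs[d]? = some v := ⟨cs[d], List.getElem?_eq_getElem hd⟩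
    by_cases hds : d = s
    · subst hds
      rw [List.getElem?_set, if_pos rfl, if_pos hd, hv]
      rw [List.getD_eq_getElem?_getD, hv]
      simp only [Option.getD_some, Option.map_some, List.count_cons, Option.some.injEq]
      simp only [BEq.rfl, if_pos]
      push_cast
      ring
    · rw [List.getElem?_set, if_neg hds]
      rw [List.count_cons, if_neg (by simp [hds])]
      simp

lemma pvSum_ite_nat {α : Type} (p : α → Prop) [DecidablePred p] (l : List α) :
    (l.map (fun x => if p x then 1 else 0)).sum = l.countP (fun x => decide (p x)) := by
  induction l with
  | nil => rfl
  | cons x l ih =>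
    simp only [List.map_cons, List.sum_cons, List.countP_cons, ih]
    by_cases hx : p x
    · simp [hx]; omega
    · simp [hx]

-- count of the pair (index, char) in an indexed list
lemma pvCountP_zipIdx_pin (l : List Char) (k j : Nat) (c : Char) :
    (l.zipIdx k).countP (fun p => decide (p.2 = j) && (p.1 == c))
      = if k ≤ j ∧ j - k < l.length ∧ l.getD (j - k) ' ' = c then 1 else 0 := by
  induction l generalizing k with
  | nil => simp
  | cons c' l ih =>
    rw [List.zipIdx_cons, List.countP_cons, ih (k + 1)]
    rcases Nat.lt_trichotomy j k with hlt | heq | hgt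
    · have h1 : ¬(k + 1 ≤ j ∧ j - (k + 1) < l.length ∧ l.getD (j - (k + 1)) ' ' = c) := by
        rintro ⟨h, -, -⟩; omega
      have h2 : ¬(k ≤ j ∧ j - k < (c' :: l).length ∧ (c' :: l).getD (j - k) ' ' = c) := by
        rintro ⟨h, -, -⟩; omega
      have h3 : (decide ((c', k).2 = j) && ((c', k).1 == c)) = false := by
        simp only [Bool.and_eq_false_iff, decide_eq_false_iff_not]
        left; omega
      rw [if_neg h1, if_neg h2, h3]
      simp
    · subst heq
      have h1 : ¬(j + 1 ≤ j ∧ j - (j + 1) < l.length ∧ l.getD (j - (j + 1)) ' ' = c) := by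
        rintro ⟨h, -, -⟩; omega
      rw [if_neg h1]
      simp only [Nat.sub_self, List.getD_cons_zero, List.length_cons]
      by_cases hc : c' = c
      · simp [hc]
      · simp [hc]
    · have h3 : (decide ((c', k).2 = j) && ((c', k).1 == c)) = false := by
        simp only [Bool.and_eq_false_iff, decide_eq_false_iff_not]
        left; omega
      rw [h3]
      have hsk : j - k = (j - (k + 1)) + 1 := by omega
      rw [List.length_cons, hsk, List.getD_cons_succ]
      have hiff : (k ≤ j ∧ j - (k + 1) + 1 < l.length + 1 ∧ l.getD (j - (k + 1)) ' ' = c)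
           ↔ (k + 1 ≤ j ∧ j - (k + 1) < l.length ∧ l.getD (j - (k + 1)) ' ' = c) := by
        constructor
        · rintro ⟨a, b, cc⟩; exact ⟨by omega, by omega, cc⟩
        · rintro ⟨a, b, cc⟩; exact ⟨by omega, by omega, cc⟩
      rw [if_congr hiff rfl rfl]
      simp

lemma pvShift_countP (a : List Char) (P : Char × Nat → Bool) :
    (a.zipIdx 1).countP P = a.zipIdx.countP (fun p => P (p.1, p.2 + 1)) := by
  rw [List.zipIdx_succ, List.countP_map]
  apply List.countP_congr
  rintro ⟨pc, pi⟩ _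
  rfl

-- the key reindexing: counting matched pairs along diagonal s equals A's zip count
lemma pvDiag_eq_zip (a b : List Char) (s : Nat) :
    (a.zipIdx).countP (fun p =>
        decide (s ≤ p.2) && decide (p.2 - s < b.length) && (b.getD (p.2 - s) ' ' == p.1))
      = pvG a b s := by
  induction a generalizing b s with
  | nil => simp [pvG]
  | cons x a ih =>
    rw [List.zipIdx_cons, List.countP_cons, pvShift_countP]
    cases s with
    | zero =>
      cases b with
      | nil => simp [pvG]
      | cons c bt =>
        rw [List.countP_congr (q := fun p =>
              decide ((0:Nat) ≤ p.2) && decide (p.2 - 0 < bt.length) && (bt.getD (p.2 - 0) ' ' == p.1))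
            (by rintro ⟨pc, pi⟩ _
                simp)]
        rw [ih bt 0]
        simp only [pvG, List.drop_zero, List.zip_cons_cons, List.countP_cons]
        simp
        rcases eq_or_ne c x with hxc | hxc
        · rw [hxc]
        · rw [if_neg hxc, if_neg (fun hh => hxc hh.symm)]
    | succ s' =>
      rw [List.countP_congr (q := fun p =>
            decide (s' ≤ p.2) && decide (p.2 - s' < b.length) && (b.getD (p.2 - s') ' ' == p.1))
          (by rintro ⟨pc, pi⟩ _
              have h1 : s' + 1 ≤ pi + 1 ↔ s' ≤ pi := by omega
              have h2 : pi + 1 - (s' + 1) = pi - s' := by omega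
              simp [h1, h2])]
      rw [ih b s']
      simp only [pvG, List.drop_succ_cons]
      simp

-- proof-side names for the enumerated views B traverses
def pvEnum (l : List Char) : List (Int × Char) := l.zipIdx.map (fun p => ((p.2 : Int), p.1))

def pvPosL (lb : List Char) (ch : Char) : List Int :=
  (pvEnum lb).filterMap (fun jc => if jc.2 = ch then some jc.1 else none)

def pvEv (la lb : List Char) : List Nat :=
  (pvEnum la).flatMap (fun ic =>
    ((pvPosL lb ic.2).filter (fun j => decide (j ≤ ic.1))).map (fun j => (ic.1 - j).toNat))

lemma pvEnum_eq (l : List Char) : PySem.List.enumerate l 0 = pvEnum l := by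
  rw [pvEnumerate_eq]
  unfold pvEnum
  simp

lemma pvFilterMap_guard {α β : Type} (p : α → Prop) [DecidablePred p] (g : α → β) (l : List α) :
    l.filterMap (fun x => if p x then some (g x) else none)
      = (l.filter (fun x => decide (p x))).map g := by
  induction l with
  | nil => rfl
  | cons x l ih =>
    rw [List.filterMap_cons, List.filter_cons]
    by_cases hx : p x
    · simp [hx, ih]
    · simp [hx, ih]

-- the events one character of seqA contributes, counted at diagonal s
lemma pvPerI (lb : List Char) (ch : Char) (i s : Nat) :
    List.count s (((pvPosL lb ch).filter (fun j => decide (j ≤ ((i : Nat) : Int)))).map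
        (fun j => (((i : Nat) : Int) - j).toNat))
      = if s ≤ i ∧ i - s < lb.length ∧ lb.getD (i - s) ' ' = ch then 1 else 0 := by
  unfold pvPosL pvEnum
  rw [List.filterMap_map]
  rw [show ((fun (jc : Int × Char) => if jc.2 = ch then some jc.1 else none) ∘
        (fun (p : Char × Nat) => ((p.2 : Int), p.1)))
      = (fun (p : Char × Nat) => if p.1 = ch then some ((p.2 : Int)) else none) from rfl]
  rw [pvFilterMap_guard (fun (p : Char × Nat) => p.1 = ch) (fun p => ((p.2 : Int))) _]
  rw [List.filter_map, List.map_map, List.count_eq_countP, List.countP_map, List.countP_filter,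
      List.countP_filter]
  by_cases hsi : s ≤ i
  · rw [List.countP_congr (q := fun q => decide (q.2 = i - s) && (q.1 == ch))
        (by rintro ⟨qc, qj⟩ _
            simp only [Function.comp_apply, Bool.and_eq_true, beq_iff_eq, decide_eq_true_eq]
            constructor
            · rintro ⟨⟨h1, h2⟩, h3⟩; exact ⟨by omega, h3⟩
            · rintro ⟨h1, h2⟩; exact ⟨⟨by omega, by omega⟩, h2⟩)]
    rw [pvCountP_zipIdx_pin lb 0 (i - s) ch]
    simp only [Nat.zero_le, true_and, Nat.sub_zero]
    exact if_congr ⟨fun ⟨h1, h2⟩ => ⟨hsi, h1, h2⟩, fun ⟨_, h1, h2⟩ => ⟨h1, h2⟩⟩ rfl rfl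
  · rw [List.countP_eq_zero.mpr (by
        rintro ⟨qc, qj⟩ _ h
        simp only [Function.comp_apply, Bool.and_eq_true, beq_iff_eq, decide_eq_true_eq] at h
        obtain ⟨⟨h1, h2⟩, -⟩ := h
        omega)]
    rw [if_neg (by rintro ⟨h1, -, -⟩; omega)]

-- total count of events at diagonal s = A's count at shift s
lemma pvEv_count (la lb : List Char) (s : Nat) :
    (pvEv la lb).count s = pvG la lb s := by
  unfold pvEv
  rw [List.count_flatMap]
  unfold pvEnum
  rw [List.map_map]
  simp only [Function.comp_def]
  rw [List.map_congr_left (f := _) (g := fun (q : Char × Nat) =>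
        if s ≤ q.2 ∧ q.2 - s < lb.length ∧ lb.getD (q.2 - s) ' ' = q.1 then 1 else 0)
      (fun q _ => pvPerI lb q.1 q.2 s)]
  rw [pvSum_ite_nat]
  rw [List.countP_congr (q := fun p =>
        decide (s ≤ p.2) && decide (p.2 - s < lb.length) && (lb.getD (p.2 - s) ' ' == p.1))
      (by rintro ⟨qc, qj⟩ _
          simp only [decide_eq_true_eq, Bool.and_eq_true, beq_iff_eq]
          constructor
          · rintro ⟨h1, h2, h3⟩; exact ⟨⟨h1, h2⟩, h3⟩
          · rintro ⟨⟨h1, h2⟩, h3⟩; exact ⟨h1, h2, h3⟩)]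
  exact pvDiag_eq_zip la lb s

-- every event hits an index below la.length + 1
lemma pvEv_lt (la lb : List Char) : ∀ d ∈ pvEv la lb, d < la.length + 1 := by
  intro d hd
  unfold pvEv pvEnum at hd
  simp only [List.mem_flatMap, List.mem_map, List.mem_filter] at hd
  obtain ⟨ic, ⟨⟨q, hq, rfl⟩, j, ⟨hj1, hj2⟩, rfl⟩⟩ := hd
  have hqlt : q.2 < la.length := by
    obtain ⟨-, h2, -⟩ := List.mem_zipIdx hq
    omega
  have hj0 : 0 ≤ j := by
    unfold pvPosL pvEnum at hj1
    simp only [List.mem_filterMap, List.mem_map] at hj1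
    obtain ⟨jc, ⟨⟨r, hr, rfl⟩, hif⟩⟩ := hj1
    by_cases hc : ((r.2 : Int), r.1).2 = q.1
    · rw [if_pos hc] at hif
      cases hif
      positivity
    · rw [if_neg hc] at hif
      cases hif
  simp only [decide_eq_true_eq] at hj2
  omega

-- B's accumulated counts list equals the per-shift counts table
lemma pvCounts_eq (la lb : List Char) :
    ((PySem.List.enumerate la).foldl
      (fun (counts : List Int) ic =>
        (((PySem.List.enumerate lb).foldl
            (fun (pos : PySem.Dict Char (List Int)) jc =>
              pos.insert jc.2 ((pos.getD jc.2 []) ++ [jc.1])) PySem.Dict.empty).getD ic.2 []).foldl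
          (fun (counts : List Int) j =>
            if j ≤ ic.1 then
              counts.set (ic.1 - j).toNat (counts.getD (ic.1 - j).toNat 0 + 1)
            else counts)
          counts)
      (List.replicate (la.length + 1) 0))
    = (List.range (la.length + 1)).map (fun s => ((pvG la lb s : Nat) : Int)) := by
  have hpos : ∀ ch : Char,
      (((PySem.List.enumerate lb).foldl
          (fun (pos : PySem.Dict Char (List Int)) jc =>
            pos.insert jc.2 ((pos.getD jc.2 []) ++ [jc.1])) PySem.Dict.empty).getD ch [])
        = pvPosL lb ch := by
    intro ch
    rw [pvPos_getD, pvEnum_eq]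
    rfl
  have hstep : (fun (counts : List Int) (ic : Int × Char) =>
        ((((PySem.List.enumerate lb).foldl
            (fun (pos : PySem.Dict Char (List Int)) jc =>
              pos.insert jc.2 ((pos.getD jc.2 []) ++ [jc.1])) PySem.Dict.empty).getD ic.2 []).foldl
          (fun (counts : List Int) j =>
            if j ≤ ic.1 then
              counts.set (ic.1 - j).toNat (counts.getD (ic.1 - j).toNat 0 + 1)
            else counts)
          counts))
      = (fun (counts : List Int) (ic : Int × Char) =>
          (((pvPosL lb ic.2).filter (fun j => decide (j ≤ ic.1))).map
            (fun j => (ic.1 - j).toNat)).foldl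
            (fun (cs : List Int) (d : Nat) => cs.set d (cs.getD d 0 + 1)) counts) := by
    funext counts ic
    rw [hpos, pvFoldl_filter, List.foldl_map]
  rw [hstep, pvEnum_eq, ← List.foldl_flatMap]
  have hEv : ((pvEnum la).flatMap (fun ic =>
      ((pvPosL lb ic.2).filter (fun j => decide (j ≤ ic.1))).map (fun j => (ic.1 - j).toNat)))
      = pvEv la lb := rfl
  rw [hEv]
  apply List.ext_getElem?
  intro s
  rw [pvIncr_getElem? _ _ s (by
        intro d hd
        rw [List.length_replicate]
        exact pvEv_lt la lb d hd)]
  rcases Nat.lt_or_ge s (la.length + 1) with hs | hs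
  · rw [List.getElem?_replicate, if_pos hs, List.getElem?_map, List.getElem?_range hs]
    simp only [Option.map_some, Option.some.injEq]
    rw [pvEv_count la lb s]
    norm_num
  · rw [List.getElem?_replicate, if_neg (by omega)]
    rw [List.getElem?_eq_none (by simp; omega)]
    rfl
lemma pvMax?_cons (x : Int) (t : List Int) :
    PySem.List.max? (x :: t) (fun y => y) = some (t.foldl max x) := by
  unfold PySem.List.max?
  simp only [List.foldl_cons]
  induction t generalizing x with
  | nil => rfl
  | cons y t ih =>
    simp only [List.foldl_cons]
    show List.foldl _ (if x < y then some y else some x) t = _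
    rcases le_or_gt y x with h | h
    · rw [if_neg (by omega), show max x y = x from max_eq_left h]
      exact ih x
    · rw [if_pos h, show max x y = y from max_eq_right (le_of_lt h)]
      exact ih y

-- both programs compute the same best shift and assemble the same output
lemma pvMain (sa sb : String) (h : sa.toList.length = sb.toList.length) :
    simpleAlign sa sb = simpleAlign_alt sa sb := by
  have h0 : pvCountIdentical? sa.toList sb.toList
      = some ((pvG sa.toList sb.toList 0 : Nat) : Int) := by
    unfold pvCountIdentical?
    rw [if_neg (by omega)]
    rw [show (fun (p : Char × Char) => if p.1 = p.2 then (1 : Int) else 0)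
          = (fun p => if ((fun (q : Char × Char) => q.1 == q.2) p) = true then 1 else 0) by
        funext p; simp]
    rw [PySem.List.sum_map_ite_one_zero]
    rfl
  have hA := pvA_fold sa.toList sb.toList h sa.toList.length 1 (by omega)
      ((0 : Int), ((pvG sa.toList sb.toList 0 : Nat) : Int))
  simp only [Nat.cast_one] at hA
  simp only [simpleAlign, simpleAlign_alt, h0]
  rw [if_neg (show ¬(sa.toList.length ≠ sb.toList.length) by omega)]
  rw [hA, pvCounts_eq sa.toList sb.toList, List.range_eq_range', List.range'_succ,
      List.map_cons]
  simp only [Nat.zero_add]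
  rw [pvMax?_cons]
  simp only [Option.getD_some]
  rw [pvRun_spec]
  set g0 : Int := ((pvG sa.toList sb.toList 0 : Nat) : Int) with hg0
  set tl : List Int :=
    (List.range' 1 sa.toList.length).map (fun i => ((pvG sa.toList sb.toList i : Nat) : Int)) with htl
  by_cases hM : tl.foldl max g0 = g0
  · rw [if_pos hM, hM]
    rw [show PySem.List.index? (g0 :: tl) g0 = some 0 by
          simp [PySem.List.index?, List.idxOf?_cons]]
    simp [show PySem.List.pyRange 0 0 = [] from rfl]
  · rw [if_neg hM]
    have hmem : tl.foldl max g0 ∈ tl := (pvFoldl_max_mem tl g0).resolve_left hM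
    obtain ⟨i0, hi0⟩ : ∃ i0, List.idxOf? (tl.foldl max g0) tl = some i0 := by
      cases hh : List.idxOf? (tl.foldl max g0) tl with
      | none => exact absurd (List.idxOf?_eq_none_iff.mp hh) (by simp [hmem])
      | some i0 => exact ⟨i0, rfl⟩
    rw [show PySem.List.index? (g0 :: tl) (tl.foldl max g0) = some (i0 + 1) by
          simp only [PySem.List.index?, List.idxOf?_cons]
          rw [if_neg (by simp only [beq_iff_eq]; intro hh; exact hM hh.symm), hi0]
          rfl]
    simp only [hi0, Option.getD_some]
    rw [show (1 : Int) + ((i0 : Nat) : Int) = ((i0 + 1 : Nat) : Int) by push_cast; ring]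
    rw [PySem.List.pyRange_zero_natCast, List.map_map]
    have hdash : (List.map ((fun _ => '-') ∘ fun k : Nat => (k : Int)) (List.range (i0 + 1)))
        = List.replicate (i0 + 1) '-' := by
      refine List.eq_replicate_iff.mpr ⟨by simp, ?_⟩
      intro b hb
      simp only [List.mem_map, Function.comp_apply] at hb
      obtain ⟨-, -, hb⟩ := hb
      exact hb.symm
    rw [hdash]

-- ===== VERDICT (by name: the statement is the Claim_ definition above) =====
theorem simpleAlign_spec : Claim_equal_simpleAlign := by
  intro seqA seqB _ hpre
  unfold Spec_simpleAlign
  exact pvMain seqA seqB hpre
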